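-- pv_equiv track=rewrite | github.com/Unnamed10110/AI | ia-t1-master/sol3vegas.py | restringir
-- ===== SOURCE A (Python) =====
-- def restringir(tab, n):
--
--     restringidos = list()
--     for pos in range(n):#inicializa la lista
--         lista = list()
--         restringidos.insert(pos, lista)
--     for col in range(n):#restricciones en el tablero
--         if tab[col] != -1:  #columna libre
--             for fil in range(n):
--                 if fil not in restringidos[col]:
--                     restringidos[col].append(fil)  # se restringe la fila actual
--             for k in range(n):
--                 reina = tab[col]
--                 if not reina in restringidos[k]:
--                     restringidos[k].append(reina)  # se restringe la columna actual
--
--             # diagonales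
--             reina = tab[col]
--             for col2 in range(n):
--                 for fil2 in range(n):
--                     if reina - col == fil2 - col2 or reina + col == fil2 + col2 or col - col2 == reina - fil2 or col - col2 == fil2 - reina:
--                         if not fil2 in restringidos[col2]:
--                             restringidos[col2].append(fil2)
--     return restringidos
-- ===== SOURCE B (Python) =====
-- def restringir(tab, n):
--     # B: build each column's restriction list independently in one pass over the
--     # queens; per queen only the two diagonal rows of this column are computed
--     # directly (no n x n scan), with a seen-set for O(1) membership.
--     res = []
--     for c in range(n):
--         seen = set()
--         out = []
--         for col in range(n):
--             reina = tab[col]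
--             if reina == -1:
--                 continue
--             if c == col:
--                 for f in range(n):
--                     if f not in seen:
--                         seen.add(f)
--                         out.append(f)
--             if reina not in seen:
--                 seen.add(reina)
--                 out.append(reina)
--             d1 = reina + (c - col)
--             d2 = reina - (c - col)
--             lo, hi = (d1, d2) if d1 <= d2 else (d2, d1)
--             if 0 <= lo < n and lo not in seen:
--                 seen.add(lo)
--                 out.append(lo)
--             if lo != hi and 0 <= hi < n and hi not in seen:
--                 seen.add(hi)
--                 out.append(hi)
--         res.append(out)
--     return res
-- ===== Notes on version B (the rewrite author's own statement) =====
-- stated objective: faster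
-- what changed: B builds each column's restriction list independently in one pass over the queens, computing the two diagonal rows for that column directly with a seen-set, instead of A's per-queen n*n scan of all cells with linear list-membership tests.
import Mathlib
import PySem

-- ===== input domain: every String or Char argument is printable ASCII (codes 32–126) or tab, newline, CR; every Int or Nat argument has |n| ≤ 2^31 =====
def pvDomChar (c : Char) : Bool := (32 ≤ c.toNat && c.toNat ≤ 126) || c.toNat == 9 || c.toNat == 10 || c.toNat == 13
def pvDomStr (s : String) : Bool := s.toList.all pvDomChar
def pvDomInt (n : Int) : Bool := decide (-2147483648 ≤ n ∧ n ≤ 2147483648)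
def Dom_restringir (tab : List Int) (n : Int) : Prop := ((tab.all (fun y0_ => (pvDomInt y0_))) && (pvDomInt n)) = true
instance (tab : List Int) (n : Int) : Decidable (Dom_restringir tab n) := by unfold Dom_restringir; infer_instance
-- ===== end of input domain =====

-- B builds each column's restriction list independently, computing the two diagonal
-- rows per queen directly instead of A's per-queen n*n scan of all cells (objective: faster).

-- ===== PORT A =====
-- Python pattern 'if not v in restringidos[i]: restringidos[i].append(v)' (0 ≤ i < len rs)
def pvAddNewA (rs : List (List Int)) (i : Int) (v : Int) : List (List Int) :=
  if (rs.getD i.toNat []).contains v then rs else rs.modify i.toNat (· ++ [v])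

-- body of A's outer 'for col in range(n)' loop
def pvQueenStepA (tab : List Int) (n : Int) (rs : List (List Int)) (col : Int) : List (List Int) :=
  if PySem.List.pyGetD tab col 0 ≠ -1 then
    let rs1 := (PySem.List.pyRange 0 n 1).foldl (fun rs fil => pvAddNewA rs col fil) rs
    let rs2 := (PySem.List.pyRange 0 n 1).foldl
      (fun rs k => pvAddNewA rs k (PySem.List.pyGetD tab col 0)) rs1
    let reina := PySem.List.pyGetD tab col 0
    (PySem.List.pyRange 0 n 1).foldl (fun rs col2 =>
      (PySem.List.pyRange 0 n 1).foldl (fun rs fil2 =>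
        if reina - col = fil2 - col2 ∨ reina + col = fil2 + col2 ∨
           col - col2 = reina - fil2 ∨ col - col2 = fil2 - reina
        then pvAddNewA rs col2 fil2 else rs) rs) rs2
  else rs

def restringir (tab : List Int) (n : Int) : List (List Int) :=
  let restringidos : List (List Int) :=
    (PySem.List.pyRange 0 n 1).foldl (fun rs pos => PySem.List.insert rs pos ([] : List Int)) []
  (PySem.List.pyRange 0 n 1).foldl (pvQueenStepA tab n) restringidos

-- ===== PORT B =====
-- Python pattern 'if v not in seen: seen.add(v); out.append(v)'
def pvAddSeen (p : PySem.Set Int × List Int) (v : Int) : PySem.Set Int × List Int :=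
  if PySem.Set.contains p.1 v then p else (PySem.Set.add p.1 v, p.2 ++ [v])

-- body of B's 'for col in range(n)' loop for a fixed target column c
def pvColStepB (tab : List Int) (n c : Int) (p : PySem.Set Int × List Int) (col : Int) :
    PySem.Set Int × List Int :=
  let reina := PySem.List.pyGetD tab col 0
  if reina = -1 then p
  else
    let p1 := if c = col then (PySem.List.pyRange 0 n 1).foldl pvAddSeen p else p
    let p2 := pvAddSeen p1 reina
    let d1 := reina + (c - col)
    let d2 := reina - (c - col)
    let lo := if d1 ≤ d2 then d1 else d2
    let hi := if d1 ≤ d2 then d2 else d1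
    let p3 := if 0 ≤ lo ∧ lo < n then pvAddSeen p2 lo else p2
    if lo ≠ hi ∧ 0 ≤ hi ∧ hi < n then pvAddSeen p3 hi else p3

def restringir_alt (tab : List Int) (n : Int) : List (List Int) :=
  (PySem.List.pyRange 0 n 1).foldl (fun res c =>
    let p := (PySem.List.pyRange 0 n 1).foldl (pvColStepB tab n c)
      ((PySem.Set.empty : PySem.Set Int), ([] : List Int))
    res ++ [p.2]) []

-- ===== PRECONDITION & SPEC =====
-- A evaluates tab[col] for col in range(n): IndexError (excluded) iff n > len(tab).
def Pre_restringir (tab : List Int) (n : Int) : Prop := n ≤ PySem.List.len tab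
instance (tab : List Int) (n : Int) : Decidable (Pre_restringir tab n) := by
  unfold Pre_restringir; infer_instance
def pvWitness_restringir : List Int × Int := ([0, -1, 2], 3)
def Spec_restringir (tab : List Int) (n : Int) (out : List (List Int)) : Prop := out = restringir_alt tab n
instance (tab : List Int) (n : Int) (out : List (List Int)) : Decidable (Spec_restringir tab n out) := by unfold Spec_restringir; infer_instance

-- ===== CLAIM (what is proved, stated in full; the proofs are below) =====
def Claim_equal_restringir : Prop := ∀ (tab : List Int) (n : Int), Dom_restringir tab n → Pre_restringir tab n → Spec_restringir tab n (restringir tab n)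

-- ===== LEMMAS AND PROOFS =====

-- 'if v not in l: l.append(v)' on a single column
def pvAddIfNew (l : List Int) (v : Int) : List Int :=
  if l.contains v then l else l ++ [v]

-- the column c of A's list-of-lists state
def pvProj (rs : List (List Int)) (c : Nat) : List Int := rs.getD c []

-- what pvQueenStepA does to column c, expressed on that single column
def pvColStepA (tab : List Int) (n c : Int) (l : List Int) (col : Int) : List Int :=
  let t := PySem.List.pyGetD tab col 0
  if t ≠ -1 then
    let l1 := if c = col then (PySem.List.pyRange 0 n 1).foldl pvAddIfNew l else l
    let l2 := pvAddIfNew l1 t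
    (PySem.List.pyRange 0 n 1).foldl (fun l fil2 =>
      if t - col = fil2 - c ∨ t + col = fil2 + c ∨
         col - c = t - fil2 ∨ col - c = fil2 - t
      then pvAddIfNew l fil2 else l) l2
  else l

-- what pvColStepB does to the out-list alone
def pvColStepL (tab : List Int) (n c : Int) (l : List Int) (col : Int) : List Int :=
  let reina := PySem.List.pyGetD tab col 0
  if reina = -1 then l
  else
    let l1 := if c = col then (PySem.List.pyRange 0 n 1).foldl pvAddIfNew l else l
    let l2 := pvAddIfNew l1 reina
    let d1 := reina + (c - col)
    let d2 := reina - (c - col)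
    let lo := if d1 ≤ d2 then d1 else d2
    let hi := if d1 ≤ d2 then d2 else d1
    let l3 := if 0 ≤ lo ∧ lo < n then pvAddIfNew l2 lo else l2
    if lo ≠ hi ∧ 0 ≤ hi ∧ hi < n then pvAddIfNew l3 hi else l3

theorem length_pvAddNewA (rs : List (List Int)) (i v : Int) :
    (pvAddNewA rs i v).length = rs.length := by
  unfold pvAddNewA; split <;> simp

theorem proj_pvAddNewA (rs : List (List Int)) (i v : Int) (c : Nat) (hc : c < rs.length) :
    pvProj (pvAddNewA rs i v) c =
      if i.toNat = c then pvAddIfNew (pvProj rs c) v else pvProj rs c := by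
  unfold pvProj pvAddNewA pvAddIfNew
  by_cases hmem : (rs.getD i.toNat []).contains v = true
  · rw [if_pos hmem]
    by_cases hic : i.toNat = c
    · subst hic; rw [if_pos rfl, if_pos hmem]
    · rw [if_neg hic]
  · rw [if_neg hmem]
    by_cases hic : i.toNat = c
    · subst hic
      rw [if_pos rfl, if_neg hmem]
      simp [List.getD, List.getElem?_eq_getElem hc]
    · rw [if_neg hic]
      simp [List.getD, hic]

theorem pvFoldLen {β : Type} (f : List (List Int) → β → List (List Int))
    (h : ∀ rs b, (f rs b).length = rs.length) :
    ∀ (xs : List β) (rs : List (List Int)), (xs.foldl f rs).length = rs.length := by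
  intro xs
  induction xs with
  | nil => intro rs; rfl
  | cons x xs ih => intro rs; rw [List.foldl_cons, ih, h]

-- loop 1: 'for fil: addNew rs col fil' only touches column col
theorem proj_loop1 (col : Int) (h0 : 0 ≤ col) (fils : List Int) :
    ∀ (rs : List (List Int)) (c : Nat), c < rs.length →
      pvProj (fils.foldl (fun rs fil => pvAddNewA rs col fil) rs) c =
        if col = (c : Int) then fils.foldl pvAddIfNew (pvProj rs c) else pvProj rs c := by
  induction fils with
  | nil => intro rs c hc; simp only [List.foldl_nil]; split <;> rfl
  | cons f fs ih =>
    intro rs c hc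
    rw [List.foldl_cons, ih _ c (by rw [length_pvAddNewA]; exact hc),
      proj_pvAddNewA rs col f c hc]
    by_cases h : col = (c : Int)
    · have ht : col.toNat = c := by omega
      simp [h]
    · have ht : ¬ col.toNat = c := by omega
      simp [h, ht]

-- loop 2: 'for k: addNew rs k v' touches column c exactly when c ∈ ks
theorem proj_loop2 (v : Int) :
    ∀ (ks : List Int), ks.Nodup → (∀ k ∈ ks, 0 ≤ k) →
    ∀ (rs : List (List Int)) (c : Nat), c < rs.length →
      pvProj (ks.foldl (fun rs k => pvAddNewA rs k v) rs) c =
        if (c : Int) ∈ ks then pvAddIfNew (pvProj rs c) v else pvProj rs c := by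
  intro ks
  induction ks with
  | nil => intro _ _ rs c hc; simp
  | cons k ks ih =>
    intro hnd h0 rs c hc
    have hk0 : 0 ≤ k := h0 k (List.mem_cons_self ..)
    rw [List.foldl_cons,
      ih (List.Nodup.of_cons hnd) (fun a ha => h0 a (List.mem_cons_of_mem _ ha)) _ c
        (by rw [length_pvAddNewA]; exact hc),
      proj_pvAddNewA rs k v c hc]
    by_cases hkc : k = (c : Int)
    · have ht : k.toNat = c := by omega
      have hnin : (c : Int) ∉ ks := by rw [← hkc]; exact (List.nodup_cons.mp hnd).1
      simp [hnin, hkc]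
    · have ht : ¬ k.toNat = c := by omega
      by_cases hmem : (c : Int) ∈ ks
      · simp [ht, hmem]
      · have hcc : (c : Int) ∉ k :: ks := by
          intro hin
          rcases List.mem_cons.mp hin with h1 | h1
          · exact hkc h1.symm
          · exact hmem h1
        simp [ht, hmem, hcc]

-- inner diagonal loop for a fixed col2 only touches column col2
theorem proj_diag_inner (cond : Int → Int → Prop) [∀ a b, Decidable (cond a b)]
    (col2 : Int) (h0 : 0 ≤ col2) (fils : List Int) :
    ∀ (rs : List (List Int)) (c : Nat), c < rs.length →
      pvProj (fils.foldl (fun rs fil2 =>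
          if cond col2 fil2 then pvAddNewA rs col2 fil2 else rs) rs) c =
        if col2 = (c : Int) then
          fils.foldl (fun l fil2 => if cond col2 fil2 then pvAddIfNew l fil2 else l) (pvProj rs c)
        else pvProj rs c := by
  induction fils with
  | nil => intro rs c hc; simp only [List.foldl_nil]; split <;> rfl
  | cons f fs ih =>
    intro rs c hc
    rw [List.foldl_cons, List.foldl_cons]
    by_cases hcnd : cond col2 f
    · rw [if_pos hcnd, if_pos hcnd, ih _ c (by rw [length_pvAddNewA]; exact hc),
        proj_pvAddNewA rs col2 f c hc]
      by_cases h : col2 = (c : Int)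
      · have ht : col2.toNat = c := by omega
        simp [h]
      · have ht : ¬ col2.toNat = c := by omega
        simp [h, ht]
    · rw [if_neg hcnd, if_neg hcnd, ih _ c hc]

theorem len_diag_inner (cond : Int → Int → Prop) [∀ a b, Decidable (cond a b)]
    (col2 : Int) (fils : List Int) (rs : List (List Int)) :
    (fils.foldl (fun rs fil2 =>
        if cond col2 fil2 then pvAddNewA rs col2 fil2 else rs) rs).length = rs.length := by
  apply pvFoldLen
  intro rs b; split
  · exact length_pvAddNewA rs col2 b
  · rfl

-- outer diagonal loop: column c is touched exactly by col2 = c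
theorem proj_diag_outer (cond : Int → Int → Prop) [∀ a b, Decidable (cond a b)]
    (fils : List Int) :
    ∀ (cols : List Int), cols.Nodup → (∀ k ∈ cols, 0 ≤ k) →
    ∀ (rs : List (List Int)) (c : Nat), c < rs.length →
      pvProj (cols.foldl (fun rs col2 => fils.foldl (fun rs fil2 =>
          if cond col2 fil2 then pvAddNewA rs col2 fil2 else rs) rs) rs) c =
        if (c : Int) ∈ cols then
          fils.foldl (fun l fil2 => if cond (c : Int) fil2 then pvAddIfNew l fil2 else l) (pvProj rs c)
        else pvProj rs c := by
  intro cols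
  induction cols with
  | nil => intro _ _ rs c hc; simp
  | cons k ks ih =>
    intro hnd h0 rs c hc
    have hk0 : 0 ≤ k := h0 k (List.mem_cons_self ..)
    rw [List.foldl_cons,
      ih (List.Nodup.of_cons hnd) (fun a ha => h0 a (List.mem_cons_of_mem _ ha)) _ c
        (by rw [len_diag_inner]; exact hc),
      proj_diag_inner cond k hk0 fils rs c hc]
    by_cases hkc : k = (c : Int)
    · have hnin : (c : Int) ∉ ks := by rw [← hkc]; exact (List.nodup_cons.mp hnd).1
      subst hkc
      simp [hnin]
    · by_cases hmem : (c : Int) ∈ ks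
      · simp [hkc, hmem]
      · have hcc : (c : Int) ∉ k :: ks := by
          intro hin
          rcases List.mem_cons.mp hin with h1 | h1
          · exact hkc h1.symm
          · exact hmem h1
        simp [hkc, hmem, hcc]

theorem len_pvQueenStepA (tab : List Int) (n : Int) (rs : List (List Int)) (col : Int) :
    (pvQueenStepA tab n rs col).length = rs.length := by
  unfold pvQueenStepA
  dsimp only
  split
  · rw [pvFoldLen (f := fun rs col2 =>
        (PySem.List.pyRange 0 n 1).foldl (fun rs fil2 =>
          if PySem.List.pyGetD tab col 0 - col = fil2 - col2 ∨
             PySem.List.pyGetD tab col 0 + col = fil2 + col2 ∨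
             col - col2 = PySem.List.pyGetD tab col 0 - fil2 ∨
             col - col2 = fil2 - PySem.List.pyGetD tab col 0
          then pvAddNewA rs col2 fil2 else rs) rs)
      (fun rs col2 => len_diag_inner (fun col2 fil2 =>
          PySem.List.pyGetD tab col 0 - col = fil2 - col2 ∨
          PySem.List.pyGetD tab col 0 + col = fil2 + col2 ∨
          col - col2 = PySem.List.pyGetD tab col 0 - fil2 ∨
          col - col2 = fil2 - PySem.List.pyGetD tab col 0) col2 (PySem.List.pyRange 0 n 1) rs),
      pvFoldLen (f := fun rs k => pvAddNewA rs k (PySem.List.pyGetD tab col 0))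
        (fun rs b => length_pvAddNewA rs b _),
      pvFoldLen (f := fun rs fil => pvAddNewA rs col fil)
        (fun rs b => length_pvAddNewA rs col b)]
  · rfl

theorem proj_pvQueenStepA (tab : List Int) (n : Int) (rs : List (List Int)) (col : Int)
    (hcol : 0 ≤ col) (c : Nat) (hc : c < rs.length) (hcn : (c : Int) < n) :
    pvProj (pvQueenStepA tab n rs col) c = pvColStepA tab n (c : Int) (pvProj rs c) col := by
  have hmem : (c : Int) ∈ PySem.List.pyRange 0 n 1 := by
    rw [PySem.List.mem_pyRange_one]
    exact ⟨Int.natCast_nonneg c, hcn⟩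
  have hpos : ∀ k ∈ PySem.List.pyRange 0 n 1, (0:Int) ≤ k :=
    fun k hk => (PySem.List.mem_pyRange_one.mp hk).1
  unfold pvQueenStepA pvColStepA
  dsimp only
  by_cases h1 : PySem.List.pyGetD tab col 0 ≠ -1
  · rw [if_pos h1, if_pos h1]
    have l1 : ((PySem.List.pyRange 0 n 1).foldl (fun rs fil => pvAddNewA rs col fil) rs).length
        = rs.length := pvFoldLen _ (fun rs b => length_pvAddNewA rs col b) _ rs
    rw [proj_diag_outer (fun col2 fil2 =>
        PySem.List.pyGetD tab col 0 - col = fil2 - col2 ∨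
        PySem.List.pyGetD tab col 0 + col = fil2 + col2 ∨
        col - col2 = PySem.List.pyGetD tab col 0 - fil2 ∨
        col - col2 = fil2 - PySem.List.pyGetD tab col 0)
      (PySem.List.pyRange 0 n 1) (PySem.List.pyRange 0 n 1)
      (PySem.List.nodup_pyRange_one 0 n) hpos _ c
        (by rw [pvFoldLen _ (fun rs b => length_pvAddNewA rs b _)]; rw [l1]; exact hc),
      if_pos hmem,
      proj_loop2 (PySem.List.pyGetD tab col 0) (PySem.List.pyRange 0 n 1)
        (PySem.List.nodup_pyRange_one 0 n) hpos _ c (by rw [l1]; exact hc),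
      if_pos hmem,
      proj_loop1 col hcol (PySem.List.pyRange 0 n 1) rs c hc]
    by_cases h2 : (c : Int) = col
    · simp [h2]
    · rw [if_neg (fun h => h2 h.symm), if_neg h2]
  · rw [if_neg h1, if_neg h1]

theorem proj_queen_fold (tab : List Int) (n : Int) :
    ∀ (qs : List Int), (∀ x ∈ qs, 0 ≤ x) →
    ∀ (rs : List (List Int)) (c : Nat), c < rs.length → (c : Int) < n →
      pvProj (qs.foldl (pvQueenStepA tab n) rs) c =
        qs.foldl (pvColStepA tab n (c : Int)) (pvProj rs c) := by
  intro qs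
  induction qs with
  | nil => intro _ rs c _ _; rfl
  | cons q qs ih =>
    intro hq rs c hc hcn
    rw [List.foldl_cons, List.foldl_cons,
      ih (fun a ha => hq a (List.mem_cons_of_mem _ ha)) _ c
        (by rw [len_pvQueenStepA]; exact hc) hcn,
      proj_pvQueenStepA tab n rs q (hq q (List.mem_cons_self ..)) c hc hcn]

theorem init_aux (N : Nat) :
    (PySem.List.pyRange 0 (N : Int) 1).foldl
        (fun rs pos => PySem.List.insert rs pos ([] : List Int)) [] =
      List.replicate N [] := by
  induction N with
  | zero => rw [PySem.List.pyRange_one_eq_nil (by omega)]; rfl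
  | succ m ih =>
    have hcast : ((m + 1 : Nat) : Int) = (m : Int) + 1 := by push_cast; ring
    rw [hcast, PySem.List.pyRange_one_succ_right (Int.natCast_nonneg m), List.foldl_append, ih,
      List.foldl_cons, List.foldl_nil]
    have hlen : (m : Int) = PySem.List.len (List.replicate m ([] : List Int)) := by
      simp [PySem.List.len_eq]
    rw [hlen, PySem.List.insert_len]
    simp [List.replicate_succ']

-- initialization loop builds n empty lists
theorem init_eq_replicate (n : Int) :
    (PySem.List.pyRange 0 n 1).foldl
        (fun rs pos => PySem.List.insert rs pos ([] : List Int)) [] =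
      List.replicate n.toNat [] := by
  by_cases hn : n ≤ 0
  · rw [PySem.List.pyRange_one_eq_nil hn]
    simp [show n.toNat = 0 by omega]
  · obtain ⟨N, rfl⟩ : ∃ N : Nat, n = (N : Int) := ⟨n.toNat, by omega⟩
    rw [init_aux]
    simp

-- ===== B side =====

theorem pvAddSeen_diag (l : List Int) (v : Int) :
    pvAddSeen (l, l) v = (pvAddIfNew l v, pvAddIfNew l v) := by
  unfold pvAddSeen pvAddIfNew PySem.Set.add PySem.Set.contains
  by_cases h : v ∈ l <;> simp [h]

theorem foldl_pvAddSeen_diag (xs : List Int) :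
    ∀ l : List Int, xs.foldl pvAddSeen (l, l) = (xs.foldl pvAddIfNew l, xs.foldl pvAddIfNew l) := by
  induction xs with
  | nil => intro l; rfl
  | cons x xs ih => intro l; rw [List.foldl_cons, pvAddSeen_diag, ih, List.foldl_cons]

theorem pvColStepB_diag (tab : List Int) (n c : Int) (l : List Int) (col : Int) :
    pvColStepB tab n c (l, l) col = (pvColStepL tab n c l col, pvColStepL tab n c l col) := by
  unfold pvColStepB pvColStepL
  dsimp only
  by_cases h1 : PySem.List.pyGetD tab col 0 = -1
  · simp [h1]
  · simp only [if_neg h1]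
    by_cases h2 : c = col
    · simp only [if_pos h2, foldl_pvAddSeen_diag, pvAddSeen_diag]
      split_ifs <;> simp [pvAddSeen_diag]
    · simp only [if_neg h2, pvAddSeen_diag]
      split_ifs <;> simp [pvAddSeen_diag]

theorem foldl_pvColStepB_diag (tab : List Int) (n c : Int) (cols : List Int) :
    ∀ l : List Int, cols.foldl (pvColStepB tab n c) (l, l) =
      (cols.foldl (pvColStepL tab n c) l, cols.foldl (pvColStepL tab n c) l) := by
  induction cols with
  | nil => intro l; rfl
  | cons x xs ih => intro l; rw [List.foldl_cons, pvColStepB_diag, ih, List.foldl_cons]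

-- range(n) filtered to the (at most two) diagonal values
theorem filter_range_pair (N : Nat) (lo hi : Int) (hlh : lo ≤ hi) :
    (PySem.List.pyRange 0 (N : Int) 1).filter (fun f => decide (f = lo ∨ f = hi)) =
      (if 0 ≤ lo ∧ lo < (N : Int) then [lo] else []) ++
        (if lo ≠ hi ∧ 0 ≤ hi ∧ hi < (N : Int) then [hi] else []) := by
  induction N with
  | zero =>
    rw [PySem.List.pyRange_one_eq_nil (by omega)]
    simp only [List.filter_nil]
    split_ifs <;> simp_all <;> omega
  | succ m ih =>
    have hcast : ((m + 1 : Nat) : Int) = (m : Int) + 1 := by push_cast; ring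
    rw [hcast, PySem.List.pyRange_one_succ_right (Int.natCast_nonneg m), List.filter_append, ih]
    simp only [List.filter_cons, List.filter_nil]
    split_ifs <;> simp_all <;> omega

-- the diagonal n*n scan of A equals B's direct two-value update, per column
theorem colStepA_eq_colStepL (tab : List Int) (n c : Int) (hn : 0 ≤ n) (l : List Int) (col : Int) :
    pvColStepA tab n c l col = pvColStepL tab n c l col := by
  obtain ⟨N, rfl⟩ : ∃ N : Nat, n = (N : Int) := ⟨n.toNat, by omega⟩
  unfold pvColStepA pvColStepL
  dsimp only
  by_cases h1 : PySem.List.pyGetD tab col 0 = -1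
  · rw [if_neg (by simpa using h1), if_pos h1]
  · rw [if_pos h1, if_neg h1]
    set t := PySem.List.pyGetD tab col 0 with ht
    by_cases hd : t + (c - col) ≤ t - (c - col)
    · simp only [if_pos hd]
      rw [PySem.List.foldl_ite_eq_foldl_filter
          (p := fun fil2 => t - col = fil2 - c ∨ t + col = fil2 + c ∨
            col - c = t - fil2 ∨ col - c = fil2 - t) pvAddIfNew]
      rw [List.filter_congr (l := PySem.List.pyRange 0 (N : Int) 1)
          (q := fun f => decide (f = t + (c - col) ∨ f = t - (c - col)))
          (fun f _ => by simp only [decide_eq_decide]; constructor <;> intro h <;> omega)]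
      rw [filter_range_pair N _ _ (by omega)]
      split_ifs <;> simp
    · simp only [if_neg hd]
      rw [PySem.List.foldl_ite_eq_foldl_filter
          (p := fun fil2 => t - col = fil2 - c ∨ t + col = fil2 + c ∨
            col - c = t - fil2 ∨ col - c = fil2 - t) pvAddIfNew]
      rw [List.filter_congr (l := PySem.List.pyRange 0 (N : Int) 1)
          (q := fun f => decide (f = t - (c - col) ∨ f = t + (c - col)))
          (fun f _ => by simp only [decide_eq_decide]; constructor <;> intro h <;> omega)]
      rw [filter_range_pair N _ _ (by omega)]
      split_ifs <;> simp

theorem restringir_alt_eq_map (tab : List Int) (n : Int) :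
    restringir_alt tab n = (PySem.List.pyRange 0 n 1).map (fun c =>
      (PySem.List.pyRange 0 n 1).foldl (pvColStepL tab n c) []) := by
  unfold restringir_alt
  dsimp only
  rw [PySem.List.foldl_append_singleton_eq_map
    (f := fun c => ((PySem.List.pyRange 0 n 1).foldl (pvColStepB tab n c)
      ((PySem.Set.empty : PySem.Set Int), ([] : List Int))).2)]
  rw [List.nil_append]
  apply List.map_congr_left
  intro c _
  have hemp : ((PySem.Set.empty : PySem.Set Int), ([] : List Int))
      = (([] : List Int), ([] : List Int)) := rfl
  rw [hemp, foldl_pvColStepB_diag]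

theorem restringir_eq_map (tab : List Int) (n : Int) :
    restringir tab n = (List.range n.toNat).map (fun (c : Nat) =>
      (PySem.List.pyRange 0 n 1).foldl (pvColStepA tab n ((c : Nat) : Int)) []) := by
  unfold restringir
  dsimp only
  rw [init_eq_replicate]
  have hlen : ((PySem.List.pyRange 0 n 1).foldl (pvQueenStepA tab n)
      (List.replicate n.toNat [])).length = n.toNat := by
    rw [pvFoldLen _ (fun rs col => len_pvQueenStepA tab n rs col)]
    simp
  apply List.ext_getElem
  · simp [hlen]
  · intro i h1 h2
    simp only [List.getElem_map, List.getElem_range]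
    have hiN : i < n.toNat := by simpa [hlen] using h1
    have hproj := proj_queen_fold tab n (PySem.List.pyRange 0 n 1)
      (fun x hx => (PySem.List.mem_pyRange_one.mp hx).1)
      (List.replicate n.toNat []) i (by simpa using hiN) (by omega)
    have hstart : pvProj (List.replicate n.toNat ([] : List Int)) i = [] := by
      simp [pvProj]
    rw [hstart] at hproj
    rw [← hproj]
    simp [pvProj, List.getD, List.getElem?_eq_getElem h1]

-- ===== VERDICT (by name: the statement is the Claim_ definition above) =====
theorem restringir_spec : Claim_equal_restringir := by
  intro tab n _ _
  unfold Spec_restringir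
  rw [restringir_eq_map, restringir_alt_eq_map]
  by_cases hn : n ≤ 0
  · rw [PySem.List.pyRange_one_eq_nil hn]
    simp [show n.toNat = 0 by omega]
  · apply List.ext_getElem
    · simp [PySem.List.length_pyRange_one]
    · intro i h1 h2
      simp only [List.getElem_map, List.getElem_range, PySem.List.getElem_pyRange_one]
      have hz : (0 : Int) + (i : Int) = (i : Int) := by ring
      rw [hz]
      exact PySem.List.foldl_congr_mem _ _ _ _
        (fun acc x hx => colStepA_eq_colStepL tab n (i : Int) (by omega) acc x)
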